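-- pv_equiv track=rewrite | github.com/miqueiaspcoelho/EstudosPython | PythonDiversos/Outros/Puzzle 8 peças.py | distManhattan
-- ===== SOURCE A (Python) =====
-- def distManhattan(numero,i,j):
--     meta=[[0,1,2],[3,4,5],[6,7,8]]
--     stop=False
--     for x in range(0,3):
--         for y in range(0,3):
--             if meta[x][y]!= numero:
--                 stop=False
--             else:
--                 stop=True
--                 distY=abs(x-i)
--                 distX=abs(y-j)
--                 distTotal=distX + distY
--                 return distTotal
-- ===== SOURCE B (Python) =====
-- def distManhattan(numero, i, j):
--     # closed form: goal cell of value n is (n//3, n%3)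
--     if numero in {0, 1, 2, 3, 4, 5, 6, 7, 8}:
--         n = int(numero)
--         return abs(n // 3 - i) + abs(n % 3 - j)
-- ===== Notes on version B (the rewrite author's own statement) =====
-- stated objective: simpler
-- what changed: Replaces the 3x3 nested scan of the goal grid with the closed form: the goal cell of value n is (n//3, n%3), so the distance is abs(n//3 - i) + abs(n%3 - j).
-- outside the precondition, e.g. on distManhattan(9, 0, 0): A returns None, B returns None
import Mathlib
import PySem

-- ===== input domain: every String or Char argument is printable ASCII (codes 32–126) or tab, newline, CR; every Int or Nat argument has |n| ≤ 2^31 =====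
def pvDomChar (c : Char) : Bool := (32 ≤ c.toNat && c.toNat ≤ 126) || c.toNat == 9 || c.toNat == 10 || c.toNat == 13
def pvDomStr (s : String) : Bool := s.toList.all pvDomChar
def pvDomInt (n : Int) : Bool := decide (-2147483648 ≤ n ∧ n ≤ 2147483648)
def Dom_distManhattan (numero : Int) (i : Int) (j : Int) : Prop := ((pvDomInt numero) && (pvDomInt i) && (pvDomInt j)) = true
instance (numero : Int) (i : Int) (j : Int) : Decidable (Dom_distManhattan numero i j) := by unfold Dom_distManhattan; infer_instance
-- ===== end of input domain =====

-- B replaces the nested 3x3 scan with the closed form (n//3, n%3) for the goal cell; equivalence is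
-- about the returned int on 0 ≤ numero ≤ 8 (elsewhere A falls through returning None, not an int).

-- ===== PORT A =====
-- nested for-loops over range(0,3) with early return, as an Option Int accumulator;
-- .getD 0 is only a type filler for the fall-through (None) path, excluded by Pre_.
def distManhattan (numero : Int) (i : Int) (j : Int) : Int :=
  let grade : List (List Int) := [[0, 1, 2], [3, 4, 5], [6, 7, 8]]
  let r : Option Int :=
    (PySem.List.pyRange 0 3 1).foldl (fun (acc : Option Int) x =>
      match acc with
      | some v => some v
      | none =>
        (PySem.List.pyRange 0 3 1).foldl (fun (acc2 : Option Int) y =>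
          match acc2 with
          | some v => some v
          | none =>
            if ((PySem.List.pyGet? grade x).bind (fun row => PySem.List.pyGet? row y)).getD 0 ≠ numero then
              none
            else
              let distY := |x - i|
              let distX := |y - j|
              let distTotal := distX + distY
              some distTotal) none) none
  r.getD 0

-- ===== PORT B =====
-- membership guard, then the closed form; 0 is a type filler for the None fall-through (outside Pre_).
def distManhattan_alt (numero : Int) (i : Int) (j : Int) : Int :=
  if numero ∈ ([0, 1, 2, 3, 4, 5, 6, 7, 8] : List Int) then
    |PySem.Int.floordiv numero 3 - i| + |PySem.Int.mod numero 3 - j|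
  else 0

-- ===== PRECONDITION & SPEC =====
-- Pre_ excludes numero outside 0..8, where the Python A falls through and returns None (not an int).
def Pre_distManhattan (numero : Int) (i : Int) (j : Int) : Prop := 0 ≤ numero ∧ numero ≤ 8
instance (numero : Int) (i : Int) (j : Int) : Decidable (Pre_distManhattan numero i j) := by unfold Pre_distManhattan; infer_instance
def pvWitness_distManhattan : Int × Int × Int := (4, 0, 2)

def Spec_distManhattan (numero : Int) (i : Int) (j : Int) (out : Int) : Prop := out = distManhattan_alt numero i j
instance (numero : Int) (i : Int) (j : Int) (out : Int) : Decidable (Spec_distManhattan numero i j out) := by unfold Spec_distManhattan; infer_instance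

-- ===== CLAIM (what is proved, stated in full; the proofs are below) =====
def Claim_equal_distManhattan : Prop := ∀ (numero : Int) (i : Int) (j : Int), Dom_distManhattan numero i j → Pre_distManhattan numero i j → Spec_distManhattan numero i j (distManhattan numero i j)

-- ===== LEMMAS AND PROOFS =====

-- ===== VERDICT (by name: the statement is the Claim_ definition above) =====
theorem distManhattan_spec : Claim_equal_distManhattan := by
  intro numero i j _ hpre
  obtain ⟨h0, h8⟩ := hpre
  unfold Spec_distManhattan
  interval_cases numero <;>
    simp [distManhattan, distManhattan_alt, PySem.List.pyRange, PySem.List.pyGet?,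
      PySem.List.pyIdx?, List.range_succ, PySem.Int.floordiv, PySem.Int.mod, Int.add_comm]
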